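-- pv_equiv track=rewrite | github.com/Maulik-darji/Python_Basic_to_Advance | Numbers/5_Puzzel_Based_Number/9_Neon_Number.py | neon
-- ===== SOURCE A (Python) =====
-- def neon(n):
--     sum = 0
--     check = n**2
--     while check>0:
--         digit = check%10
--         sum += digit
--         check = check//10
--     return n == sum
-- ===== SOURCE B (Python) =====
-- def neon(n):
--     return n == sum(int(ch) for ch in str(n * n))
-- ===== Notes on version B (the rewrite author's own statement) =====
-- stated objective: idiomatic
-- what changed: Replaces the modulo/floor-division digit-extraction loop with summing the integer value of each character of str(n*n).
import Mathlib
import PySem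

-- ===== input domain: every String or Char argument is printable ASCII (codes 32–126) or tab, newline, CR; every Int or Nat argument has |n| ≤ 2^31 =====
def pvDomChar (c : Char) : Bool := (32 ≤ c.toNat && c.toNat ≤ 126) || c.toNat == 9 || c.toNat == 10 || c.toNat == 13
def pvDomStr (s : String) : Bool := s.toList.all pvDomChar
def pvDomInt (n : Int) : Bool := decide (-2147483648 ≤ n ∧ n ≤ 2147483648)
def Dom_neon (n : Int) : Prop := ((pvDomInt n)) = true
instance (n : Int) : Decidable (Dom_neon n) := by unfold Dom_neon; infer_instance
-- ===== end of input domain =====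

-- B replaces A's modulo/floor-division digit loop by summing int(ch) over the characters of str(n*n); objective: idiomatic.

-- ===== PORT A =====
-- while check>0: sum += check%10; check = check//10
def neonLoop (check sum : Int) : Int :=
  if _h : check > 0 then
    neonLoop (PySem.Int.floordiv check 10) (sum + PySem.Int.mod check 10)
  else sum
termination_by check.toNat
decreasing_by
  have h1 : PySem.Int.floordiv check 10 < check :=
    (PySem.Int.floordiv_lt_iff_lt_mul (by omega)).mpr (by omega)
  have _h2 : (0:Int) ≤ PySem.Int.floordiv check 10 :=
    (PySem.Int.le_floordiv_iff_mul_le (by omega)).mpr (by omega)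
  omega

def neon (n : Int) : Bool := decide (n = neonLoop (n ^ 2) 0)

-- ===== PORT B =====
-- sum(int(ch) for ch in str(n*n)); the .getD 0 branch of int(ch) is unreachable: every
-- character of str(n*n) with n*n ≥ 0 is a decimal digit, so int(ch) never raises.
def neon_alt (n : Int) : Bool :=
  decide (n = ((PySem.Int.toChars (n * n)).map
    (fun c => (PySem.Int.ofChars? [c]).getD 0)).sum)

-- ===== PRECONDITION & SPEC =====
def Spec_neon (n : Int) (out : Bool) : Prop := out = neon_alt n
instance (n : Int) (out : Bool) : Decidable (Spec_neon n out) := by unfold Spec_neon; infer_instance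

-- ===== CLAIM (what is proved, stated in full; the proofs are below) =====
def Claim_equal_neon : Prop := ∀ (n : Int), Dom_neon n → Spec_neon n (neon n)

-- ===== LEMMAS AND PROOFS =====

-- A's loop computes the base-10 digit sum.
theorem neonLoop_eq_digitSum (m : Nat) : ∀ s : Int, neonLoop (m : Int) s = s + ((Nat.digits 10 m).sum : Int) := by
  induction m using Nat.strong_induction_on with
  | _ m ih =>
    intro s
    rw [neonLoop]
    by_cases hm : 0 < m
    · have hpos : (0:Int) < (m : Int) := by exact_mod_cast hm
      rw [dif_pos hpos]
      have hfd : PySem.Int.floordiv (m : Int) 10 = ((m / 10 : Nat) : Int) := by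
        simp [PySem.Int.floordiv, Int.fdiv_eq_ediv]
      have hmd : PySem.Int.mod (m : Int) 10 = ((m % 10 : Nat) : Int) := by
        simp [PySem.Int.mod, Int.fmod_eq_emod]
      rw [hfd, hmd, ih (m / 10) (Nat.div_lt_self hm (by norm_num))]
      rw [Nat.digits_def' (by norm_num : (1:Nat) < 10) hm]
      simp only [List.sum_cons]
      push_cast
      ring
    · have hm0 : m = 0 := by omega
      subst hm0
      simp [Nat.digits_zero]

-- str of a positive Nat is its digits, most significant first.
theorem toDigitsCore_eq (f : Nat) : ∀ (m : Nat) (acc : List Char), 0 < m → m < 10 ^ f →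
    Nat.toDigitsCore 10 f m acc = ((Nat.digits 10 m).map Nat.digitChar).reverse ++ acc := by
  induction f with
  | zero => intro m acc h1 h2; simp at h2; omega
  | succ f ih =>
    intro m acc h1 h2
    rw [Nat.toDigitsCore]
    rw [Nat.digits_def' (by norm_num : (1:Nat) < 10) h1]
    by_cases hq : m / 10 = 0
    · simp [hq, Nat.digits_zero]
    · rw [if_neg hq]
      rw [ih (m / 10) _ (Nat.pos_of_ne_zero hq)
        (Nat.div_lt_of_lt_mul (by rw [← pow_succ'] ; exact h2))]
      simp

theorem toDigits_eq (m : Nat) (h : 0 < m) :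
    Nat.toDigits 10 m = ((Nat.digits 10 m).map Nat.digitChar).reverse := by
  have hb : m < 10 ^ (m + 1) := by
    calc m < m + 1 := Nat.lt_succ_self m
    _ < 10 ^ (m + 1) := Nat.lt_pow_self (by norm_num)
  simpa [Nat.toDigits] using toDigitsCore_eq (m + 1) m [] h hb

-- int(digitChar d) = d for decimal digits.
theorem ofChars_digitChar (d : Nat) (hd : d < 10) :
    (PySem.Int.ofChars? [Nat.digitChar d]).getD 0 = (d : Int) := by
  interval_cases d <;> decide

theorem sum_map_digits (l : List Nat) (hl : ∀ d ∈ l, d < 10) :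
    ((l.map Nat.digitChar).reverse.map (fun c => (PySem.Int.ofChars? [c]).getD 0)).sum
      = (l.sum : Int) := by
  rw [← List.map_reverse, List.map_map, List.map_reverse, List.sum_reverse]
  induction l with
  | nil => simp
  | cons a t ih =>
    simp only [List.map_cons, List.sum_cons, Function.comp]
    rw [ofChars_digitChar a (hl a (by simp)), ih (fun d hd => hl d (by simp [hd]))]
    push_cast
    ring

theorem digitSum_eq_charSum (m : Nat) :
    ((Nat.digits 10 m).sum : Int)
      = ((PySem.Int.toChars (m : Int)).map (fun c => (PySem.Int.ofChars? [c]).getD 0)).sum := by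
  rw [PySem.Int.toChars, if_neg (by omega : ¬ ((m : Int) < 0)), Int.toNat_natCast]
  by_cases h : 0 < m
  · rw [toDigits_eq m h,
      sum_map_digits _ (fun d hd => Nat.digits_lt_base (by norm_num) hd)]
  · have hm0 : m = 0 := by omega
    subst hm0
    decide

-- ===== VERDICT (by name: the statement is the Claim_ definition above) =====
theorem neon_spec : Claim_equal_neon := by
  intro n _
  unfold Spec_neon neon neon_alt
  obtain ⟨m, hm⟩ : ∃ m : Nat, n * n = (m : Int) :=
    ⟨(n * n).toNat, (Int.toNat_of_nonneg (mul_self_nonneg n)).symm⟩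
  have hsq : n ^ 2 = n * n := sq n
  rw [hsq, hm, neonLoop_eq_digitSum, zero_add, digitSum_eq_charSum]
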